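-- pv_equiv track=rewrite | github.com/Leo20031999/Isomorphism | isomorphism3.py | _build_edge_adjacency_matrix
-- ===== SOURCE A (Python) =====
-- from typing import List, Tuple, Any, Dict
--
-- def _build_edge_adjacency_matrix(triple_tuple) -> List[List[int]]:
--     m = len(triple_tuple)
--     edges = [(u, v) for (_, u, v) in triple_tuple]
--     mat = [[0] * m for _ in range(m)]
--     for i in range(m):
--         ui, vi = edges[i]
--         for j in range(i + 1, m):
--             uj, vj = edges[j]
--             if ui == uj or ui == vj or vi == uj or vi == vj:
--                 mat[i][j] = 1
--                 mat[j][i] = 1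
--     return mat
-- ===== SOURCE B (Python) =====
-- def _build_edge_adjacency_matrix(triple_tuple):
--     m = len(triple_tuple)
--     incident = {}
--     for k, (_, u, v) in enumerate(triple_tuple):
--         incident.setdefault(u, []).append(k)
--         incident.setdefault(v, []).append(k)
--     mat = [[0] * m for _ in range(m)]
--     for w in incident:
--         idxs = incident[w]
--         for a in range(len(idxs)):
--             i = idxs[a]
--             for b in range(a + 1, len(idxs)):
--                 j = idxs[b]
--                 if i != j:
--                     mat[i][j] = 1
--                     mat[j][i] = 1
--     return mat
-- ===== Notes on version B (the rewrite author's own statement) =====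
-- stated objective: faster
-- what changed: B replaces A's all-pairs double loop comparing every two edges' endpoints by an inverted index (dict mapping each vertex to its incident edge indices, built in one pass) and marks mat[i][j]=mat[j][i]=1 only for index pairs inside each vertex's incidence list, skipping i==j so self-loops keep the diagonal zero.
import Mathlib
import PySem

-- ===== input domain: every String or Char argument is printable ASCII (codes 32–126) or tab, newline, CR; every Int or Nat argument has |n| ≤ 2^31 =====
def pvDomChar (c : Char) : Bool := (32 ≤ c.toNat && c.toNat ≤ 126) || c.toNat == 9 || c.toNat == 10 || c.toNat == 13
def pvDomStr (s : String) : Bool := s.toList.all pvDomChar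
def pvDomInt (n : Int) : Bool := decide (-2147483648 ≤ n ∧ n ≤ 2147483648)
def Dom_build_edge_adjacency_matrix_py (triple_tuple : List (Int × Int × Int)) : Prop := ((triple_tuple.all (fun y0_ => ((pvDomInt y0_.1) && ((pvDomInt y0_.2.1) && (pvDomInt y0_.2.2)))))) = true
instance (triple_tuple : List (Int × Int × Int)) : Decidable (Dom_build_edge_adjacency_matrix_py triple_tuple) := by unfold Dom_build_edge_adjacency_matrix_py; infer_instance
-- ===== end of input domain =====

-- B replaces A's all-pairs O(m^2) endpoint comparison by an inverted index vertex -> incident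
-- edge indices, marking only pairs inside each incidence list (objective: alternative algorithm).
-- Both ports share only the literal semantics of the Python statement 'mat[i][j] = 1'.

-- the Python statement 'mat[i][j] = 1' (appears verbatim in both programs)
def set21 (mat : List (List Int)) (i j : Int) : List (List Int) :=
  PySem.List.pySetD mat i (PySem.List.pySetD (PySem.List.pyGetD mat i []) j 1)

-- the Python statement pair 'mat[i][j] = 1; mat[j][i] = 1'
def mark (mat : List (List Int)) (i j : Int) : List (List Int) :=
  set21 (set21 mat i j) j i

-- ===== PORT A =====
def build_edge_adjacency_matrix_py (triple_tuple : List (Int × Int × Int)) : List (List Int) :=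
  let m : Int := triple_tuple.length
  let edges : List (Int × Int) := triple_tuple.map (fun e => (e.2.1, e.2.2))
  let mat0 : List (List Int) := (PySem.List.pyRange 0 m 1).map (fun _ => PySem.List.pyRepeat [(0 : Int)] m)
  (PySem.List.pyRange 0 m 1).foldl (fun mat i =>
    let ei := PySem.List.pyGetD edges i (0, 0)
    (PySem.List.pyRange (i + 1) m 1).foldl (fun mat j =>
      let ej := PySem.List.pyGetD edges j (0, 0)
      if ei.1 = ej.1 ∨ ei.1 = ej.2 ∨ ei.2 = ej.1 ∨ ei.2 = ej.2 then mark mat i j else mat) mat) mat0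

-- ===== PORT B =====
def build_edge_adjacency_matrix_py_alt (triple_tuple : List (Int × Int × Int)) : List (List Int) :=
  let m : Int := triple_tuple.length
  let incident : PySem.Dict Int (List Int) :=
    (PySem.List.enumerate triple_tuple 0).foldl
      (fun d ke => (d.modify ke.2.2.1 [] (· ++ [ke.1])).modify ke.2.2.2 [] (· ++ [ke.1]))
      PySem.Dict.empty
  let mat0 : List (List Int) := (PySem.List.pyRange 0 m 1).map (fun _ => PySem.List.pyRepeat [(0 : Int)] m)
  incident.keys.foldl (fun mat w =>
    let idxs := incident.getD w []
    (PySem.List.pyRange 0 idxs.length 1).foldl (fun mat a =>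
      let i := PySem.List.pyGetD idxs a 0
      (PySem.List.pyRange (a + 1) idxs.length 1).foldl (fun mat b =>
        let j := PySem.List.pyGetD idxs b 0
        if i ≠ j then mark mat i j else mat) mat) mat) mat0

-- ===== PRECONDITION & SPEC =====
def Spec_build_edge_adjacency_matrix_py (triple_tuple : List (Int × Int × Int)) (out : List (List Int)) : Prop := out = build_edge_adjacency_matrix_py_alt triple_tuple
instance (triple_tuple : List (Int × Int × Int)) (out : List (List Int)) : Decidable (Spec_build_edge_adjacency_matrix_py triple_tuple out) := by unfold Spec_build_edge_adjacency_matrix_py; infer_instance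

-- ===== CLAIM (what is proved, stated in full; the proofs are below) =====
def Claim_equal_build_edge_adjacency_matrix_py : Prop := ∀ (triple_tuple : List (Int × Int × Int)), Dom_build_edge_adjacency_matrix_py triple_tuple → Spec_build_edge_adjacency_matrix_py triple_tuple (build_edge_adjacency_matrix_py triple_tuple)

-- ===== LEMMAS AND PROOFS =====

-- proof-only abstractions
def marks (ps : List (Int × Int)) (mat : List (List Int)) : List (List Int) :=
  ps.foldl (fun m p => mark m p.1 p.2) mat

def Square (n : Nat) (mat : List (List Int)) : Prop :=
  mat.length = n ∧ ∀ row ∈ mat, row.length = n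

def entry (mat : List (List Int)) (i j : Int) : Int :=
  PySem.List.pyGetD (PySem.List.pyGetD mat i []) j 0

def mat0f (t : List (Int × Int × Int)) : List (List Int) :=
  (PySem.List.pyRange 0 (t.length : Int) 1).map (fun _ => PySem.List.pyRepeat [(0 : Int)] (t.length : Int))

def pairsA (t : List (Int × Int × Int)) : List (Int × Int) :=
  let edges : List (Int × Int) := t.map (fun e => (e.2.1, e.2.2))
  (PySem.List.pyRange 0 (t.length : Int) 1).flatMap (fun i =>
    ((PySem.List.pyRange (i + 1) (t.length : Int) 1).filter (fun j =>
      decide ((PySem.List.pyGetD edges i (0, 0)).1 = (PySem.List.pyGetD edges j (0, 0)).1 ∨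
              (PySem.List.pyGetD edges i (0, 0)).1 = (PySem.List.pyGetD edges j (0, 0)).2 ∨
              (PySem.List.pyGetD edges i (0, 0)).2 = (PySem.List.pyGetD edges j (0, 0)).1 ∨
              (PySem.List.pyGetD edges i (0, 0)).2 = (PySem.List.pyGetD edges j (0, 0)).2))).map (fun j => (i, j)))

def dstep (d : PySem.Dict Int (List Int)) (ke : Int × (Int × Int × Int)) : PySem.Dict Int (List Int) :=
  (d.modify ke.2.2.1 [] (· ++ [ke.1])).modify ke.2.2.2 [] (· ++ [ke.1])

def incidentD (t : List (Int × Int × Int)) : PySem.Dict Int (List Int) :=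
  (PySem.List.enumerate t 0).foldl dstep PySem.Dict.empty

def pairsOf (idxs : List Int) : List (Int × Int) :=
  (PySem.List.pyRange 0 (idxs.length : Int) 1).flatMap (fun a =>
    ((PySem.List.pyRange (a + 1) (idxs.length : Int) 1).filter (fun b =>
      decide (PySem.List.pyGetD idxs a 0 ≠ PySem.List.pyGetD idxs b 0))).map (fun b =>
      (PySem.List.pyGetD idxs a 0, PySem.List.pyGetD idxs b 0)))

def pairsB (t : List (Int × Int × Int)) : List (Int × Int) :=
  (incidentD t).keys.flatMap (fun w => pairsOf ((incidentD t).getD w []))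

def incL (l : List (Int × (Int × Int × Int))) (w : Int) : List Int :=
  l.flatMap (fun ke => (if ke.2.2.1 = w then [ke.1] else []) ++ (if ke.2.2.2 = w then [ke.1] else []))

lemma square_set21 {n : Nat} {mat : List (List Int)} (h : Square n mat)
    {i : Int} (hi : 0 ≤ i ∧ i < (n : Int)) (j : Int) :
    Square n (set21 mat i j) := by
  obtain ⟨hlen, hrow⟩ := h
  have hlt : i.toNat < mat.length := by omega
  unfold set21
  rw [PySem.List.pySetD_of_nonneg _ _ hi.1]
  refine ⟨by simpa using hlen, ?_⟩
  intro row hr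
  rcases List.mem_or_eq_of_mem_set hr with h' | h'
  · exact hrow _ h'
  · subst h'
    rw [PySem.List.length_pySetD, PySem.List.pyGetD_eq_getElem mat [] hi.1 (by rw [hlen]; exact hi.2)]
    exact hrow _ (List.getElem_mem _)

lemma square_mark {n : Nat} {mat : List (List Int)} (h : Square n mat)
    {i j : Int} (hi : 0 ≤ i ∧ i < (n : Int)) (hj : 0 ≤ j ∧ j < (n : Int)) :
    Square n (mark mat i j) := square_set21 (square_set21 h hi j) hj i

lemma square_marks {n : Nat} {mat : List (List Int)} (h : Square n mat) {ps : List (Int × Int)}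
    (hb : ∀ p ∈ ps, (0 ≤ p.1 ∧ p.1 < (n : Int)) ∧ (0 ≤ p.2 ∧ p.2 < (n : Int))) :
    Square n (marks ps mat) := by
  induction ps generalizing mat with
  | nil => exact h
  | cons p ps ih =>
    exact ih (square_mark h (hb p (by simp)).1 (hb p (by simp)).2) (fun q hq => hb q (by simp [hq]))

lemma entry_set21 {n : Nat} {mat : List (List Int)} (h : Square n mat)
    {i j x y : Int} (hi : 0 ≤ i ∧ i < (n : Int)) (hj : 0 ≤ j ∧ j < (n : Int))
    (hx : 0 ≤ x ∧ x < (n : Int)) (hy : 0 ≤ y ∧ y < (n : Int)) :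
    entry (set21 mat i j) x y = if x = i ∧ y = j then 1 else entry mat x y := by
  obtain ⟨hlen, hrow⟩ := h
  have hiN : i = ((i.toNat : Nat) : Int) := (Int.toNat_of_nonneg hi.1).symm
  have hjN : j = ((j.toNat : Nat) : Int) := (Int.toNat_of_nonneg hj.1).symm
  have hxN : x = ((x.toNat : Nat) : Int) := (Int.toNat_of_nonneg hx.1).symm
  have hyN : y = ((y.toNat : Nat) : Int) := (Int.toNat_of_nonneg hy.1).symm
  unfold entry set21
  rw [hxN, hyN, hiN, hjN]
  rw [PySem.List.pyGetD_pySetD_natCast mat i.toNat x.toNat _ [] (by omega)]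
  by_cases hxi : x.toNat = i.toNat
  · rw [if_pos hxi]
    have hrlen : (PySem.List.pyGetD mat ((i.toNat : Nat) : Int) []).length = n := by
      rw [PySem.List.pyGetD_eq_getElem mat [] (by omega) (by omega)]
      exact hrow _ (List.getElem_mem _)
    rw [PySem.List.pyGetD_pySetD_natCast _ j.toNat y.toNat 1 0 (by omega)]
    by_cases hyj : y.toNat = j.toNat
    · rw [if_pos hyj, if_pos ⟨by omega, by omega⟩]
    · rw [if_neg hyj, if_neg (by omega),
        show ((x.toNat : Nat) : Int) = ((i.toNat : Nat) : Int) from by omega]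
  · rw [if_neg hxi, if_neg (by omega)]

lemma entry_mark {n : Nat} {mat : List (List Int)} (h : Square n mat)
    {i j x y : Int} (hi : 0 ≤ i ∧ i < (n : Int)) (hj : 0 ≤ j ∧ j < (n : Int))
    (hx : 0 ≤ x ∧ x < (n : Int)) (hy : 0 ≤ y ∧ y < (n : Int)) :
    entry (mark mat i j) x y = if (x = i ∧ y = j) ∨ (x = j ∧ y = i) then 1 else entry mat x y := by
  unfold mark
  rw [entry_set21 (square_set21 h hi j) hj hi hx hy, entry_set21 h hi hj hx hy]
  split_ifs <;> tauto

lemma entry_marks {n : Nat} {mat : List (List Int)} (h : Square n mat)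
    {ps : List (Int × Int)} (hb : ∀ p ∈ ps, (0 ≤ p.1 ∧ p.1 < (n : Int)) ∧ (0 ≤ p.2 ∧ p.2 < (n : Int)))
    {x y : Int} (hx : 0 ≤ x ∧ x < (n : Int)) (hy : 0 ≤ y ∧ y < (n : Int)) :
    entry (marks ps mat) x y = if ∃ p ∈ ps, p = (x, y) ∨ p = (y, x) then 1 else entry mat x y := by
  induction ps generalizing mat with
  | nil => simp [marks]
  | cons p ps ih =>
    have hp := hb p (by simp)
    have : marks (p :: ps) mat = marks ps (mark mat p.1 p.2) := rfl
    rw [this, ih (square_mark h hp.1 hp.2) (fun q hq => hb q (by simp [hq])),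
      entry_mark h hp.1 hp.2 hx hy]
    by_cases hps : ∃ q ∈ ps, q = (x, y) ∨ q = (y, x)
    · rw [if_pos hps, if_pos (by rcases hps with ⟨q, hq, h2⟩; exact ⟨q, List.mem_cons_of_mem _ hq, h2⟩)]
    · rw [if_neg hps]
      by_cases hpp : (x = p.1 ∧ y = p.2) ∨ (x = p.2 ∧ y = p.1)
      · rw [if_pos hpp, if_pos]
        exact ⟨p, List.mem_cons_self .., by rcases hpp with ⟨h1, h2⟩ | ⟨h1, h2⟩ <;>
          simp [Prod.ext_iff, h1.symm, h2.symm]⟩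
      · rw [if_neg hpp, if_neg]
        rintro ⟨q, hq, h2⟩
        rcases List.mem_cons.mp hq with rfl | hq'
        · exact hpp (by rcases h2 with h2 | h2 <;> rw [Prod.ext_iff] at h2 <;> tauto)
        · exact hps ⟨q, hq', h2⟩

lemma A_eq_marks (t : List (Int × Int × Int)) :
    build_edge_adjacency_matrix_py t = marks (pairsA t) (mat0f t) := by
  unfold build_edge_adjacency_matrix_py marks pairsA mat0f
  rw [List.flatMap_def, List.foldl_flatten, List.foldl_map]
  simp only [PySem.List.foldl_ite_eq_foldl_filter, List.foldl_map]

lemma B_eq_marks (t : List (Int × Int × Int)) :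
    build_edge_adjacency_matrix_py_alt t = marks (pairsB t) (mat0f t) := by
  unfold build_edge_adjacency_matrix_py_alt marks pairsB pairsOf incidentD dstep mat0f
  rw [List.flatMap_def, List.foldl_flatten, List.foldl_map]
  simp only [List.flatMap_def, List.foldl_flatten, List.foldl_map,
    PySem.List.foldl_ite_eq_foldl_filter]

lemma getD_foldl_dstep (l : List (Int × (Int × Int × Int))) (d : PySem.Dict Int (List Int)) (w : Int) :
    (l.foldl dstep d).getD w [] = d.getD w [] ++ incL l w := by
  induction l generalizing d with
  | nil => simp [incL]
  | cons ke l ih =>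
    rw [List.foldl_cons, ih]
    have hstep : (dstep d ke).getD w [] =
        d.getD w [] ++ ((if ke.2.2.1 = w then [ke.1] else []) ++ (if ke.2.2.2 = w then [ke.1] else [])) := by
      simp only [dstep, PySem.Dict.getD_modify]
      by_cases h1 : w = ke.2.2.2 <;> by_cases h2 : w = ke.2.2.1
      · rw [if_pos h1, if_pos (show ke.2.2.2 = ke.2.2.1 by omega),
          if_pos (show ke.2.2.1 = w by omega), if_pos (show ke.2.2.2 = w by omega), ← h2]
        simp
      · rw [if_pos h1, if_neg (show ¬ ke.2.2.2 = ke.2.2.1 by omega),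
          if_neg (show ¬ ke.2.2.1 = w by omega), if_pos (show ke.2.2.2 = w by omega), ← h1]
        simp
      · rw [if_neg h1, if_pos h2, if_pos (show ke.2.2.1 = w by omega),
          if_neg (show ¬ ke.2.2.2 = w by omega), ← h2]
        simp
      · rw [if_neg h1, if_neg h2, if_neg (show ¬ ke.2.2.1 = w by omega),
          if_neg (show ¬ ke.2.2.2 = w by omega)]
        simp
    have hcons : incL (ke :: l) w =
        ((if ke.2.2.1 = w then [ke.1] else []) ++ (if ke.2.2.2 = w then [ke.1] else [])) ++ incL l w := by
      simp [incL]
    rw [hstep, hcons, List.append_assoc]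

lemma mem_keys_foldl_dstep (l : List (Int × (Int × Int × Int))) (d : PySem.Dict Int (List Int)) (w : Int) :
    w ∈ (l.foldl dstep d).keys ↔ w ∈ d.keys ∨ ∃ ke ∈ l, ke.2.2.1 = w ∨ ke.2.2.2 = w := by
  induction l generalizing d with
  | nil => simp
  | cons ke l ih =>
    rw [List.foldl_cons, ih]
    have hk : w ∈ (dstep d ke).keys ↔ w = ke.2.2.2 ∨ w = ke.2.2.1 ∨ w ∈ d.keys := by
      simp [dstep, PySem.Dict.keys_modify, PySem.Dict.mem_keys_insert]
    rw [hk]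
    simp only [List.mem_cons]
    constructor
    · rintro ((h | h | h) | ⟨ke', hke', h⟩)
      · exact Or.inr ⟨ke, Or.inl rfl, Or.inr h.symm⟩
      · exact Or.inr ⟨ke, Or.inl rfl, Or.inl h.symm⟩
      · exact Or.inl h
      · exact Or.inr ⟨ke', Or.inr hke', h⟩
    · rintro (h | ⟨ke', (rfl | hke'), h⟩)
      · exact Or.inl (Or.inr (Or.inr h))
      · rcases h with h | h
        · exact Or.inl (Or.inr (Or.inl h.symm))
        · exact Or.inl (Or.inl h.symm)
      · exact Or.inr ⟨ke', hke', h⟩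

lemma mem_incL {l : List (Int × (Int × Int × Int))} {w x : Int} :
    x ∈ incL l w ↔ ∃ ke ∈ l, ke.1 = x ∧ (ke.2.2.1 = w ∨ ke.2.2.2 = w) := by
  simp only [incL, List.mem_flatMap, List.mem_append, List.mem_ite_nil_right, List.mem_singleton]
  constructor
  · rintro ⟨ke, hke, h⟩; exact ⟨ke, hke, by tauto⟩
  · rintro ⟨ke, hke, h⟩; exact ⟨ke, hke, by tauto⟩

lemma pairwise_incL (t : List (Int × Int × Int)) (w : Int) :
    (incL (PySem.List.enumerate t 0) w).Pairwise (· ≤ ·) := by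
  rw [incL, List.pairwise_flatMap]
  refine ⟨fun a _ => by split_ifs <;> simp, ?_⟩
  refine (PySem.List.pairwise_lt_enumerate t 0).imp ?_
  intro a b hab x hx y hy
  simp only [List.mem_append, List.mem_ite_nil_right, List.mem_singleton] at hx hy
  have h1 : x = a.1 := by tauto
  have h2 : y = b.1 := by tauto
  omega

def edgeOf (t : List (Int × Int × Int)) (X : Int) : Int × Int :=
  PySem.List.pyGetD (t.map (fun e => (e.2.1, e.2.2))) X (0, 0)

def adjP (t : List (Int × Int × Int)) (X Y : Int) : Prop :=
  (edgeOf t X).1 = (edgeOf t Y).1 ∨ (edgeOf t X).1 = (edgeOf t Y).2 ∨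
  (edgeOf t X).2 = (edgeOf t Y).1 ∨ (edgeOf t X).2 = (edgeOf t Y).2

def incP (t : List (Int × Int × Int)) (X w : Int) : Prop :=
  (edgeOf t X).1 = w ∨ (edgeOf t X).2 = w

lemma adjP_iff_exists (t : List (Int × Int × Int)) (X Y : Int) :
    adjP t X Y ↔ ∃ w, incP t X w ∧ incP t Y w := by
  unfold adjP incP
  constructor
  · rintro (h | h | h | h)
    · exact ⟨(edgeOf t Y).1, Or.inl h, Or.inl rfl⟩
    · exact ⟨(edgeOf t Y).2, Or.inl h, Or.inr rfl⟩
    · exact ⟨(edgeOf t Y).1, Or.inr h, Or.inl rfl⟩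
    · exact ⟨(edgeOf t Y).2, Or.inr h, Or.inr rfl⟩
  · rintro ⟨w, (h1 | h1), (h2 | h2)⟩
    · exact Or.inl (h1.trans h2.symm)
    · exact Or.inr (Or.inl (h1.trans h2.symm))
    · exact Or.inr (Or.inr (Or.inl (h1.trans h2.symm)))
    · exact Or.inr (Or.inr (Or.inr (h1.trans h2.symm)))

lemma adjP_symm {t : List (Int × Int × Int)} {X Y : Int} (h : adjP t X Y) : adjP t Y X := by
  unfold adjP at h ⊢; tauto

lemma mem_pairsA {t : List (Int × Int × Int)} {X Y : Int} :
    (X, Y) ∈ pairsA t ↔ (0 ≤ X ∧ X + 1 ≤ Y ∧ Y < (t.length : Int)) ∧ adjP t X Y := by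
  simp only [pairsA, List.mem_flatMap, List.mem_map, List.mem_filter,
    PySem.List.mem_pyRange_one, decide_eq_true_eq, Prod.mk.injEq]
  constructor
  · rintro ⟨i, ⟨hi0, _⟩, j, ⟨⟨hj1, hjm⟩, hadj⟩, rfl, rfl⟩
    exact ⟨⟨hi0, hj1, hjm⟩, hadj⟩
  · rintro ⟨⟨h0, h1, h2⟩, hadj⟩
    exact ⟨X, ⟨h0, by omega⟩, Y, ⟨⟨h1, h2⟩, hadj⟩, rfl, rfl⟩

lemma getD_incidentD (t : List (Int × Int × Int)) (w : Int) :
    (incidentD t).getD w [] = incL (PySem.List.enumerate t 0) w := by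
  unfold incidentD
  rw [getD_foldl_dstep]
  simp [PySem.Dict.getD_empty]

lemma incP_iff {t : List (Int × Int × Int)} {X w : Int} (h0 : 0 ≤ X) (h1 : X < (t.length : Int)) :
    incP t X w ↔ ((t[X.toNat]'(by omega)).2.1 = w ∨ (t[X.toNat]'(by omega)).2.2 = w) := by
  unfold incP edgeOf
  rw [PySem.List.pyGetD_eq_getElem _ _ h0 (by simpa using h1), List.getElem_map]

lemma mem_incL_iff_incP {t : List (Int × Int × Int)} {w X : Int} :
    X ∈ incL (PySem.List.enumerate t 0) w ↔ ((0 ≤ X ∧ X < (t.length : Int)) ∧ incP t X w) := by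
  rw [mem_incL]
  constructor
  · rintro ⟨ke, hke, rfl, h⟩
    obtain ⟨k, hk, rfl⟩ := (PySem.List.mem_enumerate_iff ..).mp hke
    have hb : (0 : Int) ≤ (0 : Int) + (k : Int) ∧ (0 : Int) + (k : Int) < (t.length : Int) := by
      constructor <;> omega
    refine ⟨hb, ?_⟩
    rw [incP_iff hb.1 hb.2]
    simpa [show ((0 : Int) + (k : Int)).toNat = k by omega] using h
  · rintro ⟨⟨h0, h1⟩, h⟩
    refine ⟨((0 : Int) + (X.toNat : Int), t[X.toNat]'(by omega)), (PySem.List.mem_enumerate_iff ..).mpr ⟨X.toNat, by omega, rfl⟩, by simp; omega, ?_⟩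
    rw [incP_iff h0 h1] at h
    simpa using h

lemma w_mem_keys {t : List (Int × Int × Int)} {w X : Int}
    (h : X ∈ incL (PySem.List.enumerate t 0) w) : w ∈ (incidentD t).keys := by
  obtain ⟨ke, hke, _, hw⟩ := mem_incL.mp h
  unfold incidentD
  rw [mem_keys_foldl_dstep]
  exact Or.inr ⟨ke, hke, hw⟩

lemma mem_pairsOf_fwd {idxs : List Int} {x y : Int} (h : (x, y) ∈ pairsOf idxs) :
    x ∈ idxs ∧ y ∈ idxs ∧ x ≠ y := by
  simp only [pairsOf, List.mem_flatMap, List.mem_map, List.mem_filter,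
    PySem.List.mem_pyRange_one, decide_eq_true_eq, Prod.mk.injEq] at h
  obtain ⟨a, ⟨ha0, haL⟩, b, ⟨⟨hb1, hbL⟩, hne⟩, hx, hy⟩ := h
  subst hx; subst hy
  refine ⟨PySem.List.pyGetD_mem idxs 0 ⟨by omega, by simpa using haL⟩,
    PySem.List.pyGetD_mem idxs 0 ⟨by omega, by simpa using hbL⟩, hne⟩

lemma mem_pairsOf_bwd {idxs : List Int} (hs : idxs.Pairwise (· ≤ ·)) {x y : Int}
    (hx : x ∈ idxs) (hy : y ∈ idxs) (hlt : x < y) : (x, y) ∈ pairsOf idxs := by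
  obtain ⟨px, hpx, hgx⟩ := List.mem_iff_getElem.mp hx
  obtain ⟨py, hpy, hgy⟩ := List.mem_iff_getElem.mp hy
  have hlt2 : px < py := by
    rcases Nat.lt_trichotomy px py with h | h | h
    · exact h
    · exfalso; subst h; rw [hgx] at hgy; omega
    · exfalso
      have := List.pairwise_iff_getElem.mp hs py px hpy hpx h
      rw [hgx, hgy] at this; omega
  simp only [pairsOf, List.mem_flatMap, List.mem_map, List.mem_filter,
    PySem.List.mem_pyRange_one, decide_eq_true_eq, Prod.mk.injEq]
  refine ⟨(px : Int), ⟨by positivity, by exact_mod_cast hpx⟩,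
    (py : Int), ⟨⟨by omega, by exact_mod_cast hpy⟩, ?_⟩, ?_, ?_⟩
  · rw [PySem.List.pyGetD_ofNat _ _ _ hpx, PySem.List.pyGetD_ofNat _ _ _ hpy, hgx, hgy]; omega
  · rw [PySem.List.pyGetD_ofNat _ _ _ hpx, hgx]
  · rw [PySem.List.pyGetD_ofNat _ _ _ hpy, hgy]

lemma square_mat0f (t : List (Int × Int × Int)) : Square t.length (mat0f t) := by
  constructor
  · simp [mat0f, PySem.List.length_pyRange_one]
  · intro row hr
    simp only [mat0f, List.mem_map] at hr
    obtain ⟨_, _, hrow⟩ := hr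
    rw [← hrow, PySem.List.pyRepeat_singleton]
    simp

lemma bounds_pairsA (t : List (Int × Int × Int)) :
    ∀ p ∈ pairsA t, (0 ≤ p.1 ∧ p.1 < (t.length : Int)) ∧ (0 ≤ p.2 ∧ p.2 < (t.length : Int)) := by
  rintro ⟨X, Y⟩ hp
  obtain ⟨⟨h0, h1, h2⟩, _⟩ := mem_pairsA.mp hp
  exact ⟨⟨h0, by omega⟩, by omega, h2⟩

lemma bounds_pairsB (t : List (Int × Int × Int)) :
    ∀ p ∈ pairsB t, (0 ≤ p.1 ∧ p.1 < (t.length : Int)) ∧ (0 ≤ p.2 ∧ p.2 < (t.length : Int)) := by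
  rintro ⟨X, Y⟩ hp
  simp only [pairsB, List.mem_flatMap] at hp
  obtain ⟨w, hw, hp⟩ := hp
  rw [getD_incidentD] at hp
  obtain ⟨hX, hY, _⟩ := mem_pairsOf_fwd hp
  exact ⟨(mem_incL_iff_incP.mp hX).1, (mem_incL_iff_incP.mp hY).1⟩

lemma hit_iff (t : List (Int × Int × Int)) {x y : Int}
    (hx : 0 ≤ x ∧ x < (t.length : Int)) (hy : 0 ≤ y ∧ y < (t.length : Int)) :
    (∃ p ∈ pairsA t, p = (x, y) ∨ p = (y, x)) ↔ (∃ p ∈ pairsB t, p = (x, y) ∨ p = (y, x)) := by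
  have hA_C : (∃ p ∈ pairsA t, p = (x, y) ∨ p = (y, x)) ↔ (x ≠ y ∧ adjP t x y) := by
    constructor
    · rintro ⟨p, hp, rfl | rfl⟩
      · have h := mem_pairsA.mp hp; exact ⟨by omega, h.2⟩
      · have h := mem_pairsA.mp hp; exact ⟨by omega, adjP_symm h.2⟩
    · rintro ⟨hne, hadj⟩
      rcases lt_or_gt_of_ne hne with h | h
      · exact ⟨(x, y), mem_pairsA.mpr ⟨⟨hx.1, by omega, hy.2⟩, hadj⟩, Or.inl rfl⟩
      · exact ⟨(y, x), mem_pairsA.mpr ⟨⟨hy.1, by omega, hx.2⟩, adjP_symm hadj⟩, Or.inr rfl⟩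
  have hB_C : (∃ p ∈ pairsB t, p = (x, y) ∨ p = (y, x)) ↔
      (x ≠ y ∧ ∃ w, incP t x w ∧ incP t y w) := by
    constructor
    · rintro ⟨p, hp, rfl | rfl⟩ <;> (
        simp only [pairsB, List.mem_flatMap] at hp
        obtain ⟨w, hw, hp⟩ := hp
        rw [getD_incidentD] at hp
        obtain ⟨h1, h2, hne⟩ := mem_pairsOf_fwd hp)
      · exact ⟨hne, w, (mem_incL_iff_incP.mp h1).2, (mem_incL_iff_incP.mp h2).2⟩
      · exact ⟨hne.symm, w, (mem_incL_iff_incP.mp h2).2, (mem_incL_iff_incP.mp h1).2⟩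
    · rintro ⟨hne, w, h1, h2⟩
      have hx' : x ∈ incL (PySem.List.enumerate t 0) w := mem_incL_iff_incP.mpr ⟨hx, h1⟩
      have hy' : y ∈ incL (PySem.List.enumerate t 0) w := mem_incL_iff_incP.mpr ⟨hy, h2⟩
      have hwk := w_mem_keys hx'
      rcases lt_or_gt_of_ne hne with h | h
      · refine ⟨(x, y), ?_, Or.inl rfl⟩
        simp only [pairsB, List.mem_flatMap]
        exact ⟨w, hwk, by rw [getD_incidentD]; exact mem_pairsOf_bwd (pairwise_incL t w) hx' hy' h⟩
      · refine ⟨(y, x), ?_, Or.inr rfl⟩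
        simp only [pairsB, List.mem_flatMap]
        exact ⟨w, hwk, by rw [getD_incidentD]; exact mem_pairsOf_bwd (pairwise_incL t w) hy' hx' h⟩
  rw [hA_C, hB_C, adjP_iff_exists]

-- ===== VERDICT (by name: the statement is the Claim_ definition above) =====
theorem build_edge_adjacency_matrix_py_spec : Claim_equal_build_edge_adjacency_matrix_py := by
  intro t _
  unfold Spec_build_edge_adjacency_matrix_py
  rw [A_eq_marks, B_eq_marks]
  have hsq := square_mat0f t
  have hA := square_marks hsq (bounds_pairsA t)
  have hB := square_marks hsq (bounds_pairsB t)
  apply List.ext_getElem (by rw [hA.1, hB.1])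
  intro r h1 h2
  apply List.ext_getElem
  · rw [hA.2 _ (List.getElem_mem h1), hB.2 _ (List.getElem_mem h2)]
  · intro c hc1 hc2
    have hr : r < t.length := by rw [hA.1] at h1; exact h1
    have hcn : c < t.length := by
      rw [hA.2 _ (List.getElem_mem h1)] at hc1; exact hc1
    have hx : 0 ≤ (r : Int) ∧ (r : Int) < (t.length : Int) := by constructor <;> [positivity; exact_mod_cast hr]
    have hy : 0 ≤ (c : Int) ∧ (c : Int) < (t.length : Int) := by constructor <;> [positivity; exact_mod_cast hcn]
    have eA : (marks (pairsA t) (mat0f t))[r][c] = entry (marks (pairsA t) (mat0f t)) (r : Int) (c : Int) := by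
      unfold entry
      rw [PySem.List.pyGetD_ofNat _ _ _ h1, PySem.List.pyGetD_ofNat _ _ _ hc1]
    have eB : (marks (pairsB t) (mat0f t))[r][c] = entry (marks (pairsB t) (mat0f t)) (r : Int) (c : Int) := by
      unfold entry
      rw [PySem.List.pyGetD_ofNat _ _ _ h2, PySem.List.pyGetD_ofNat _ _ _ hc2]
    rw [eA, eB, entry_marks hsq (bounds_pairsA t) hx hy, entry_marks hsq (bounds_pairsB t) hx hy]
    by_cases h : ∃ p ∈ pairsA t, p = ((r : Int), (c : Int)) ∨ p = ((c : Int), (r : Int))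
    · rw [if_pos h, if_pos ((hit_iff t hx hy).mp h)]
    · rw [if_neg h, if_neg (fun h' => h ((hit_iff t hx hy).mpr h'))]
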